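-- pv_equiv track=rewrite | github.com/jclements3/HarpHymnal | trefoil/reharm/render_midi.py | _rh_pitches_for_melody_event
-- ===== SOURCE A (Python) =====
-- from typing import Any, Optional
--
-- def _rh_pitches_for_melody_event(
--     rh_activity: str,
--     melody_midi: int,
--     shape_rh_midis: list[int],
--     shape_all_midis: list[int],
--     next_bar_rh_midis: Optional[list[int]] = None,
--     key_root: str = "C",
--     mode: str = "major",
-- ) -> list[int]:
--     """Given one melody note + rh_activity tactic, return list of pitches
--     that sound at that attack point (the melody itself is included).
--     """
--     below = [p for p in shape_all_midis if p < melody_midi]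
--     below_sorted = sorted(below, reverse=True)  # closest first
--
--     if rh_activity == "rh_activity.melody_alone":
--         return [melody_midi]
--     if rh_activity == "rh_activity.melody_plus_1":
--         if below_sorted:
--             return [below_sorted[0], melody_midi]
--         return [melody_midi]
--     if rh_activity == "rh_activity.melody_plus_2":
--         picks = below_sorted[:2]
--         return sorted(picks + [melody_midi])
--     if rh_activity == "rh_activity.melody_oct":
--         return [melody_midi - 12, melody_midi]
--     # neighbor / anticipation / passing_tone handled at the rhythm level
--     # (they add extra events) — here we emit the melody alone.
--     return [melody_midi]
-- ===== SOURCE B (Python) =====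
-- from typing import Optional
--
-- def _rh_pitches_for_melody_event(
--     rh_activity: str,
--     melody_midi: int,
--     shape_rh_midis: list[int],
--     shape_all_midis: list[int],
--     next_bar_rh_midis: Optional[list[int]] = None,
--     key_root: str = "C",
--     mode: str = "major",
-- ) -> list[int]:
--     """Single-pass selection: track the one or two largest pitches below the
--     melody instead of sorting all of them."""
--     if rh_activity == "rh_activity.melody_oct":
--         return [melody_midi - 12, melody_midi]
--     if rh_activity == "rh_activity.melody_plus_1":
--         best = None
--         for p in shape_all_midis:
--             if p < melody_midi and (best is None or best < p):
--                 best = p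
--         return [melody_midi] if best is None else [best, melody_midi]
--     if rh_activity == "rh_activity.melody_plus_2":
--         b1 = None  # largest below
--         b2 = None  # second largest below
--         for p in shape_all_midis:
--             if p < melody_midi:
--                 if b1 is None or b1 < p:
--                     b2 = b1
--                     b1 = p
--                 elif b2 is None or b2 < p:
--                     b2 = p
--         out = [x for x in (b2, b1) if x is not None]
--         out.append(melody_midi)
--         return out
--     return [melody_midi]
-- ===== Notes on version B (the rewrite author's own statement) =====
-- stated objective: alternative
-- what changed: Replaces the unconditional full descending sort of all pitches below the melody by lazy single-pass selection: a running max for melody_plus_1 and a running top-2 fold for melody_plus_2, with no sort at all.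
import Mathlib
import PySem

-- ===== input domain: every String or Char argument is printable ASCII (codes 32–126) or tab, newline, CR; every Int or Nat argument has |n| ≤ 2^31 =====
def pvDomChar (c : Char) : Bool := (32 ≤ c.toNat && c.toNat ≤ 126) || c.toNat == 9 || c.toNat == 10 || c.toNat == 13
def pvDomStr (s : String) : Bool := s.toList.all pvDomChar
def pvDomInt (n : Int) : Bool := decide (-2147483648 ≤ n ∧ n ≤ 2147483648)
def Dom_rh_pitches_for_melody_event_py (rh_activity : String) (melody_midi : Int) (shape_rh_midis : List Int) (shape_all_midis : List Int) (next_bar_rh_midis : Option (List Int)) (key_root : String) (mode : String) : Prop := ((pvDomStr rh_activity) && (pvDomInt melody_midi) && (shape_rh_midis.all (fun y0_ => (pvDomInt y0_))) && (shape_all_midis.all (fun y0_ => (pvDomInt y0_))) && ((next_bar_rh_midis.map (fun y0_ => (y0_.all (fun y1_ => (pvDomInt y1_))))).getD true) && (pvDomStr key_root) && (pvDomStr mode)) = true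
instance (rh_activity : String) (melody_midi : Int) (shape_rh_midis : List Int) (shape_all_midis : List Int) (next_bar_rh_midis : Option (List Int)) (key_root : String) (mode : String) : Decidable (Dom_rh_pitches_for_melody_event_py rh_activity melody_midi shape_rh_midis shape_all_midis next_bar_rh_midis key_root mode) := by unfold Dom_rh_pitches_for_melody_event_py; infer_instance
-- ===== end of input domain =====

-- B replaces A's unconditional full descending sort of the below-melody pitches by lazy
-- single-pass selection (running max / running top-2); same return value everywhere.

-- ===== PORT A =====
def rh_pitches_for_melody_event_py (rh_activity : String) (melody_midi : Int) (shape_rh_midis : List Int) (shape_all_midis : List Int) (next_bar_rh_midis : Option (List Int)) (key_root : String) (mode : String) : List Int :=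
  let below := shape_all_midis.filter (fun p => decide (p < melody_midi))
  let below_sorted := PySem.List.sorted below (fun x => x) true
  if rh_activity = "rh_activity.melody_alone" then
    [melody_midi]
  else if rh_activity = "rh_activity.melody_plus_1" then
    match below_sorted with
    | [] => [melody_midi]
    | h :: _ => [h, melody_midi]
  else if rh_activity = "rh_activity.melody_plus_2" then
    let picks := below_sorted.take 2
    PySem.List.sorted (picks ++ [melody_midi]) (fun x => x) false
  else if rh_activity = "rh_activity.melody_oct" then
    [melody_midi - 12, melody_midi]
  else
    [melody_midi]

-- ===== PORT B =====
-- running max of the pitches strictly below m (None = no such pitch yet)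
def pvBStep1 (m : Int) (best : Option Int) (p : Int) : Option Int :=
  if p < m then
    match best with
    | none => some p
    | some b => if b < p then some p else some b
  else best

-- running top-2 (b1 = largest, b2 = second largest) of the pitches strictly below m
def pvBStep2 (m : Int) (st : Option Int × Option Int) (p : Int) : Option Int × Option Int :=
  if p < m then
    match st with
    | (none, _) => (some p, none)
    | (some b1, b2) =>
      if b1 < p then (some p, some b1)
      else
        match b2 with
        | none => (some b1, some p)
        | some b2v => if b2v < p then (some b1, some p) else (some b1, some b2v)
  else st

def pvOptList (o : Option Int) : List Int :=
  match o with
  | none => []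
  | some x => [x]

def rh_pitches_for_melody_event_py_alt (rh_activity : String) (melody_midi : Int) (shape_rh_midis : List Int) (shape_all_midis : List Int) (next_bar_rh_midis : Option (List Int)) (key_root : String) (mode : String) : List Int :=
  if rh_activity = "rh_activity.melody_oct" then
    [melody_midi - 12, melody_midi]
  else if rh_activity = "rh_activity.melody_plus_1" then
    match shape_all_midis.foldl (pvBStep1 melody_midi) none with
    | none => [melody_midi]
    | some b => [b, melody_midi]
  else if rh_activity = "rh_activity.melody_plus_2" then
    let st := shape_all_midis.foldl (pvBStep2 melody_midi) (none, none)
    pvOptList st.2 ++ pvOptList st.1 ++ [melody_midi]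
  else
    [melody_midi]

-- ===== PRECONDITION & SPEC =====
def Spec_rh_pitches_for_melody_event_py (rh_activity : String) (melody_midi : Int) (shape_rh_midis : List Int) (shape_all_midis : List Int) (next_bar_rh_midis : Option (List Int)) (key_root : String) (mode : String) (out : List Int) : Prop := out = rh_pitches_for_melody_event_py_alt rh_activity melody_midi shape_rh_midis shape_all_midis next_bar_rh_midis key_root mode
instance (rh_activity : String) (melody_midi : Int) (shape_rh_midis : List Int) (shape_all_midis : List Int) (next_bar_rh_midis : Option (List Int)) (key_root : String) (mode : String) (out : List Int) : Decidable (Spec_rh_pitches_for_melody_event_py rh_activity melody_midi shape_rh_midis shape_all_midis next_bar_rh_midis key_root mode out) := by unfold Spec_rh_pitches_for_melody_event_py; infer_instance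

-- ===== CLAIM (what is proved, stated in full; the proofs are below) =====
def Claim_equal_rh_pitches_for_melody_event_py : Prop := ∀ (rh_activity : String) (melody_midi : Int) (shape_rh_midis : List Int) (shape_all_midis : List Int) (next_bar_rh_midis : Option (List Int)) (key_root : String) (mode : String), Dom_rh_pitches_for_melody_event_py rh_activity melody_midi shape_rh_midis shape_all_midis next_bar_rh_midis key_root mode → Spec_rh_pitches_for_melody_event_py rh_activity melody_midi shape_rh_midis shape_all_midis next_bar_rh_midis key_root mode (rh_pitches_for_melody_event_py rh_activity melody_midi shape_rh_midis shape_all_midis next_bar_rh_midis key_root mode)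

-- ===== LEMMAS AND PROOFS =====

-- the first two elements of a list, as B's top-2 state
def pvToState (l : List Int) : Option Int × Option Int :=
  match l with
  | [] => (none, none)
  | [a] => (some a, none)
  | a :: b :: _ => (some a, some b)

theorem pv_head_insertBy (p : Int) (acc : List Int) :
    (PySem.List.insertBy (fun a b => decide (b < a)) p acc).head? =
      (match acc.head? with
       | none => some p
       | some y => if y < p then some p else some y) := by
  cases acc with
  | nil => simp [PySem.List.insertBy]
  | cons y ys =>
    simp only [PySem.List.insertBy, List.head?_cons]
    split_ifs with h <;> simp_all

theorem pv_state_insertBy (p : Int) (acc : List Int) :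
    pvToState (PySem.List.insertBy (fun a b => decide (b < a)) p acc) =
      (match pvToState acc with
       | (none, _) => (some p, none)
       | (some b1, b2) =>
         if b1 < p then (some p, some b1)
         else
           match b2 with
           | none => (some b1, some p)
           | some b2v => if b2v < p then (some b1, some p) else (some b1, some b2v)) := by
  match acc with
  | [] => simp [PySem.List.insertBy, pvToState]
  | [a] =>
    simp only [PySem.List.insertBy, pvToState]
    split_ifs with h <;> simp_all
  | a :: b :: rest =>
    simp only [PySem.List.insertBy, pvToState]
    by_cases h1 : a < p
    · simp [h1]
    · by_cases h2 : b < p <;> simp [h1, h2]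

theorem pv_fold1_inv (m : Int) (l : List Int) : ∀ acc : List Int,
    l.foldl (pvBStep1 m) acc.head? =
      ((l.filter (fun p => decide (p < m))).foldl
        (fun a x => PySem.List.insertBy (fun a b => decide (b < a)) x a) acc).head? := by
  induction l with
  | nil => intro acc; rfl
  | cons p l ih =>
    intro acc
    by_cases hp : p < m
    · have : pvBStep1 m acc.head? p =
          (PySem.List.insertBy (fun a b => decide (b < a)) p acc).head? := by
        rw [pv_head_insertBy]
        cases acc.head? <;> simp [pvBStep1, hp]
      simp only [List.foldl_cons, List.filter_cons, hp, decide_true, this]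
      exact ih (PySem.List.insertBy (fun a b => decide (b < a)) p acc)
    · have : pvBStep1 m acc.head? p = acc.head? := by simp [pvBStep1, hp]
      simp only [List.foldl_cons, List.filter_cons, hp, decide_false, this]
      exact ih acc

theorem pv_fold2_inv (m : Int) (l : List Int) : ∀ acc : List Int,
    l.foldl (pvBStep2 m) (pvToState acc) =
      pvToState ((l.filter (fun p => decide (p < m))).foldl
        (fun a x => PySem.List.insertBy (fun a b => decide (b < a)) x a) acc) := by
  induction l with
  | nil => intro acc; rfl
  | cons p l ih =>
    intro acc
    by_cases hp : p < m
    · have : pvBStep2 m (pvToState acc) p =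
          pvToState (PySem.List.insertBy (fun a b => decide (b < a)) p acc) := by
        rw [pv_state_insertBy]
        simp only [pvBStep2, hp, if_true]
      simp only [List.foldl_cons, List.filter_cons, hp, decide_true, this]
      exact ih (PySem.List.insertBy (fun a b => decide (b < a)) p acc)
    · have : pvBStep2 m (pvToState acc) p = pvToState acc := by simp [pvBStep2, hp]
      simp only [List.foldl_cons, List.filter_cons, hp, decide_false, this]
      exact ih acc

-- A's ascending sort of (top-2 descending ++ [m]) laid out explicitly from the top-2 state
theorem pv_sortA (m : Int) (t : List Int)
    (hp : t.Pairwise (fun a b => b ≤ a)) (hm : ∀ x ∈ t, x < m) :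
    PySem.List.sorted (t.take 2 ++ [m]) (fun x => x) false =
      pvOptList (pvToState t).2 ++ pvOptList (pvToState t).1 ++ [m] := by
  match t with
  | [] =>
    simp only [List.take, List.nil_append, pvToState, pvOptList]
    rfl
  | [a] =>
    have ham : a ≤ m := le_of_lt (hm a (by simp))
    have : PySem.List.sorted ([a] ++ [m]) (fun x => x) false = [a, m] := by
      apply PySem.List.sorted_eq_self_of_pairwise
      simp [ham]
    simpa [pvToState, pvOptList] using this
  | a :: b :: rest =>
    have hba : b ≤ a := by
      rcases List.pairwise_cons.mp hp with ⟨h1, _⟩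
      exact h1 b (by simp)
    have ham : a ≤ m := le_of_lt (hm a (by simp))
    have hbm : b ≤ m := le_of_lt (hm b (by simp))
    have : PySem.List.sorted ([a, b] ++ [m]) (fun x => x) false = [b, a, m] := by
      apply PySem.List.sorted_id_eq_of_perm_of_pairwise
      · exact List.Perm.append_right [m] (List.Perm.swap a b [])
      · simp [hba, ham, hbm]
    simpa [pvToState, pvOptList, List.take] using this

-- ===== VERDICT (by name: the statement is the Claim_ definition above) =====
theorem rh_pitches_for_melody_event_py_spec : Claim_equal_rh_pitches_for_melody_event_py := by
  intro rh_activity melody_midi shape_rh_midis shape_all_midis next_bar_rh_midis key_root mode _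
  unfold Spec_rh_pitches_for_melody_event_py
  unfold rh_pitches_for_melody_event_py rh_pitches_for_melody_event_py_alt
  by_cases h1 : rh_activity = "rh_activity.melody_alone"
  · subst h1; simp
  by_cases h2 : rh_activity = "rh_activity.melody_plus_1"
  · subst h2
    simp only [String.reduceEq, reduceIte]
    rw [PySem.List.sorted_rev_eq_foldl_insertBy]
    have hinv := pv_fold1_inv melody_midi shape_all_midis []
    simp only [List.head?_nil] at hinv
    rw [hinv]
    cases hL : List.foldl (fun a x => PySem.List.insertBy (fun a b => decide (b < a)) x a) []
        (List.filter (fun p => decide (p < melody_midi)) shape_all_midis) <;> simp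
  by_cases h3 : rh_activity = "rh_activity.melody_plus_2"
  · subst h3
    simp only [String.reduceEq, reduceIte]
    have hfold := pv_fold2_inv melody_midi shape_all_midis []
    rw [show pvToState ([] : List Int) = (none, none) from rfl] at hfold
    rw [← PySem.List.sorted_rev_eq_foldl_insertBy] at hfold
    rw [hfold]
    apply pv_sortA
    · exact PySem.List.sorted_pairwise_rev _ _
    · intro x hx
      have hmem : x ∈ shape_all_midis.filter (fun p => decide (p < melody_midi)) :=
        (PySem.List.mem_sorted _ _ _ _).mp hx
      simpa using (List.of_mem_filter hmem)
  by_cases h4 : rh_activity = "rh_activity.melody_oct"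
  · subst h4; simp
  · simp [h1, h2, h3, h4]
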